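-- pv_equiv track=rewrite | github.com/lmun/competitiveProgramingSolutions | kattis/htoo.py | stodict
-- ===== SOURCE A (Python) =====
-- from collections import defaultdict
--
-- def stodict(x):
-- 	di = defaultdict(int)
-- 	t = 0
-- 	while t < len(x):
-- 		c = x[t]
-- 		ini = t
-- 		t += 1
-- 		while t < len(x) and x[t].isdigit():
-- 			t += 1
-- 		di[x[ini]] += int(x[ini+1:t] or '1')
-- 	return di
-- ===== SOURCE B (Python) =====
-- import re
-- from collections import defaultdict
--
-- def stodict(x):
--     di = defaultdict(int)
--     for ch, num in re.findall(r'(?s)(.)(\d*)', x):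
--         di[ch] += int(num or '1')
--     return di
-- ===== Notes on version B (the rewrite author's own statement) =====
-- stated objective: idiomatic
-- what changed: Replaces A's hand-rolled index/while-loop scanner with a regex findall that tokenizes the string into (char, digit-run) pairs in one pass, then folds them into a defaultdict.
import Mathlib
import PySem

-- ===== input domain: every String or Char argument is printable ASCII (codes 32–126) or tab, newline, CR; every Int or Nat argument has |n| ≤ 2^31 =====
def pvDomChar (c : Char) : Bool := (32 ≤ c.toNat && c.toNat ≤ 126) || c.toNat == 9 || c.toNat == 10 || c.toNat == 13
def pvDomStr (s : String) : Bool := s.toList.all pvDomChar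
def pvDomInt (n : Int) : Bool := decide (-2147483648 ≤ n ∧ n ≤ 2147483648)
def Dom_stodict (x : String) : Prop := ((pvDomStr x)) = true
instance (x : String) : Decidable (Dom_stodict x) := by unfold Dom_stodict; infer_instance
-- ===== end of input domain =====

-- B replaces A's hand-rolled index/while scanning with a one-pass regex-style
-- tokenisation into (char, digit-run) pairs followed by a fold into the dict (idiomatic).

-- ===== PORT A =====
-- inner while loop: `while t < len(x) and x[t].isdigit(): t += 1` (returns the final t)
def pvDigitEnd (cs : List Char) (t : Nat) : Nat :=
  if h : t < cs.length then
    if PySem.Chars.isdigit cs[t] then pvDigitEnd cs (t + 1) else t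
  else t
termination_by cs.length - t

-- the outer while needs `t ≤ pvDigitEnd cs t` for its own termination measure
theorem pvDigitEnd_ge (cs : List Char) (t : Nat) : t ≤ pvDigitEnd cs t := by
  rw [pvDigitEnd]
  split
  · split
    · exact le_trans (Nat.le_succ t) (pvDigitEnd_ge cs (t + 1))
    · exact le_refl t
  · exact le_refl t
termination_by cs.length - t

-- outer while loop of A, state (t, di)
def stodictLoop (cs : List Char) (t : Nat) (di : PySem.Dict String Int) :
    PySem.Dict String Int :=
  if h : t < cs.length then
    let ini := t
    let t2 := pvDigitEnd cs (ini + 1)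
    let ds := PySem.List.slice cs (some ((ini + 1 : Nat) : Int)) (some ((t2 : Nat) : Int))
    -- int(x[ini+1:t] or '1'); the run consists of ASCII digits, so int() cannot raise:
    -- the `.getD 0` default is unreachable
    let v : Int := if ds = [] then 1 else (PySem.Int.ofChars? ds).getD 0
    stodictLoop cs t2 (di.modify (String.ofList [cs[ini]]) 0 (· + v))
  else di
termination_by cs.length - t
decreasing_by
  have := pvDigitEnd_ge cs (t + 1)
  omega

def stodict (x : String) : List (String × Int) :=
  (stodictLoop x.toList 0 PySem.Dict.empty).items

-- ===== PORT B =====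
-- re.findall(r'(?s)(.)(\d*)', x): any one char, then a maximal run of ASCII digits (\d)
def pvFindall (cs : List Char) : List (String × String) :=
  match cs with
  | [] => []
  | c :: rest =>
    let ds := rest.takeWhile (fun d => decide ('0' ≤ d) && decide (d ≤ '9'))
    (String.ofList [c], String.ofList ds) :: pvFindall (rest.drop ds.length)
termination_by cs.length
decreasing_by simp

def stodict_alt (x : String) : List (String × Int) :=
  ((pvFindall x.toList).foldl
      (fun di p =>
        -- di[ch] += int(num or '1'); num is a run of ASCII digits, `.getD 0` unreachable
        di.modify p.1 0 (· + (if p.2 = "" then 1 else (PySem.Int.ofStr? p.2).getD 0)))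
      PySem.Dict.empty).items

-- ===== PRECONDITION & SPEC =====
def Spec_stodict (x : String) (out : List (String × Int)) : Prop := out = stodict_alt x
instance (x : String) (out : List (String × Int)) : Decidable (Spec_stodict x out) := by
  unfold Spec_stodict; infer_instance

-- ===== CLAIM (what is proved, stated in full; the proofs are below) =====
def Claim_equal_stodict : Prop := ∀ (x : String), Dom_stodict x → Spec_stodict x (stodict x)

-- ===== LEMMAS AND PROOFS =====

-- pvDigitEnd computes start + length of the maximal digit run from `start`
theorem pvDigitEnd_eq (cs : List Char) (t : Nat) :
    pvDigitEnd cs t = t + ((cs.drop t).takeWhile PySem.Chars.isdigit).length := by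
  rw [pvDigitEnd]
  split
  · rename_i h
    rw [List.drop_eq_getElem_cons h, List.takeWhile_cons]
    by_cases hd : PySem.Chars.isdigit cs[t]
    · rw [if_pos hd, if_pos hd, pvDigitEnd_eq cs (t + 1)]
      simp; omega
    · rw [if_neg hd, if_neg hd]
      simp
  · rename_i h
    rw [List.drop_eq_nil_iff.mpr (by omega)]
    simp
termination_by cs.length - t

-- the loop of A, started at t, computes B's fold over the tokens of the suffix
theorem stodictLoop_eq_foldl (cs : List Char) (t : Nat) (di : PySem.Dict String Int) :
    stodictLoop cs t di = (pvFindall (cs.drop t)).foldl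
      (fun di p =>
        di.modify p.1 0 (· + (if p.2 = "" then 1 else (PySem.Int.ofStr? p.2).getD 0)))
      di := by
  rw [stodictLoop]
  split
  · rename_i h
    rw [List.drop_eq_getElem_cons h, pvFindall.eq_def]
    simp only [List.foldl]
    have hpred : (fun d => decide ('0' ≤ d) && decide (d ≤ '9')) = PySem.Chars.isdigit := by
      funext d; rfl
    rw [hpred]
    set rest := cs.drop (t + 1) with hrest
    set k := (rest.takeWhile PySem.Chars.isdigit).length with hk
    have hde : pvDigitEnd cs (t + 1) = t + 1 + k := pvDigitEnd_eq cs (t + 1)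
    have hslice : PySem.List.slice cs (some ((t + 1 : Nat) : Int))
        (some ((pvDigitEnd cs (t + 1) : Nat) : Int)) = rest.takeWhile PySem.Chars.isdigit := by
      rw [hde, PySem.List.slice_natCast]
      have : t + 1 + k - (t + 1) = k := by omega
      rw [this]
      exact (List.prefix_iff_eq_take.mp (List.takeWhile_prefix _)).symm
    rw [hslice]
    have hdrop : rest.drop k = cs.drop (pvDigitEnd cs (t + 1)) := by
      rw [hde, hrest, List.drop_drop]
    rw [hdrop]
    rw [stodictLoop_eq_foldl cs (pvDigitEnd cs (t + 1))]
    -- values agree: String.ofList ds = "" ↔ ds = [], and ofStr? ∘ String.ofList = ofChars?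
    have hv : (if rest.takeWhile PySem.Chars.isdigit = [] then (1 : Int)
          else (PySem.Int.ofChars? (rest.takeWhile PySem.Chars.isdigit)).getD 0)
        = (if String.ofList (rest.takeWhile PySem.Chars.isdigit) = "" then (1 : Int)
          else (PySem.Int.ofStr? (String.ofList (rest.takeWhile PySem.Chars.isdigit))).getD 0) := by
      by_cases hds : rest.takeWhile PySem.Chars.isdigit = []
      · rw [hds, if_pos rfl, if_pos (by decide)]
      · have hne : String.ofList (rest.takeWhile PySem.Chars.isdigit) ≠ "" := by
          intro hcontra
          apply hds
          have h2 := congrArg String.toList hcontra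
          rwa [String.toList_ofList] at h2
        rw [if_neg hds, if_neg hne, PySem.Int.ofStr?, String.toList_ofList]
    rw [hv]
  · rename_i h
    rw [List.drop_eq_nil_iff.mpr (by omega)]
    simp [pvFindall]
termination_by cs.length - t
decreasing_by
  have := pvDigitEnd_ge cs (t + 1)
  omega

-- ===== VERDICT (by name: the statement is the Claim_ definition above) =====
theorem stodict_spec : Claim_equal_stodict := by
  intro x _
  unfold Spec_stodict stodict stodict_alt
  exact congrArg PySem.Dict.items (stodictLoop_eq_foldl x.toList 0 PySem.Dict.empty)
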